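-- pv_equiv track=rewrite | github.com/c788630/Numclass | src/numclass/classifiers/prime.py | _is_2a_3b
-- ===== SOURCE A (Python) =====
-- def _is_2a_3b(x: int) -> tuple[bool, int, int]:
--     """
--     Return (True,a,b) if x = 2^a * 3^b for integers a,b >= 0; else (False,0,0).
--     """
--     if x <= 0:
--         return (False, 0, 0)
--     a = 0
--     while (x & 1) == 0:  # divide out 2s
--         x >>= 1
--         a += 1
--     b = 0
--     while x % 3 == 0:    # divide out 3s
--         x //= 3
--         b += 1
--     return (x == 1, a, b)
-- ===== SOURCE B (Python) =====
-- def _go(x: int) -> tuple[bool, int, int]: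
--     if x % 2 == 0:
--         ok, a, b = _go(x // 2)
--         return (ok, a + 1, b)
--     if x % 3 == 0:
--         ok, a, b = _go(x // 3)
--         return (ok, a, b + 1)
--     return (x == 1, 0, 0)
--
--
-- def _is_2a_3b(x: int) -> tuple[bool, int, int]:
--     if x <= 0:
--         return (False, 0, 0)
--     return _go(x)
-- ===== Notes on version B (the rewrite author's own statement) =====
-- stated objective: alternative
-- what changed: The two sequential imperative stripping loops (bit-twiddling for 2s, then %3 loop) are replaced by one structural recursion on x that peels a factor of 2 or 3 per call and rebuilds the exponent pair on the way out.
import Mathlib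
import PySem

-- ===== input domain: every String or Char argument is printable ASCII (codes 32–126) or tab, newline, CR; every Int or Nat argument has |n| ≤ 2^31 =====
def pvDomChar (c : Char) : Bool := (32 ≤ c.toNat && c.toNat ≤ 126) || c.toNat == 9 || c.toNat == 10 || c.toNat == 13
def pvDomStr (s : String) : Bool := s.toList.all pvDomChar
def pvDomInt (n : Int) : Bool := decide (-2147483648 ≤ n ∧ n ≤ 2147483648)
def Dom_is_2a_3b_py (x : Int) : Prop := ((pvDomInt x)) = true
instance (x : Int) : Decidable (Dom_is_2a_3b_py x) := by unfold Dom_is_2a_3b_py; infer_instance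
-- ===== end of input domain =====

-- B replaces A's two sequential imperative stripping loops by one structural recursion
-- that peels a single factor of 2 or 3 per call (objective: alternative decomposition).

-- ===== PORT A =====
-- `while (x & 1) == 0: x >>= 1; a += 1`.  The `0 < x` conjunct is a totality guard only:
-- A enters this loop only with x > 0, and the loop preserves x > 0.
def pvStrip2 (x a : Int) : Int × Int :=
  if h : 0 < x ∧ PySem.Int.band x 1 = 0 then pvStrip2 (x >>> (1 : Nat)) (a + 1) else (x, a)
termination_by x.natAbs
decreasing_by
  have h1 := PySem.Int.band_one x
  rw [Int.shiftRight_eq_div_pow]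
  simp [PySem.Int.mod_eq_emod_of_pos, (by omega : (0:Int) < 2)] at h1
  omega

-- `while x % 3 == 0: x //= 3; b += 1`, same totality guard.
def pvStrip3 (x b : Int) : Int × Int :=
  if h : 0 < x ∧ PySem.Int.mod x 3 = 0 then pvStrip3 (PySem.Int.floordiv x 3) (b + 1) else (x, b)
termination_by x.natAbs
decreasing_by
  rw [PySem.Int.floordiv_eq_ediv_of_pos (by omega)]
  rw [PySem.Int.mod_eq_emod_of_pos (by omega)] at h
  omega

def is_2a_3b_py (x : Int) : Bool × Int × Int :=
  if x ≤ 0 then (false, 0, 0)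
  else
    let p := pvStrip2 x 0
    let q := pvStrip3 p.1 0
    (decide (q.1 = 1), p.2, q.2)

-- ===== PORT B =====
-- _go from Source B; the `0 < x` conjuncts are totality guards only (B calls _go only with
-- x > 0 and recursive calls keep x > 0).
def pvGo (x : Int) : Bool × Int × Int :=
  if h2 : 0 < x ∧ PySem.Int.mod x 2 = 0 then
    let r := pvGo (PySem.Int.floordiv x 2)
    (r.1, r.2.1 + 1, r.2.2)
  else if h3 : 0 < x ∧ PySem.Int.mod x 3 = 0 then
    let r := pvGo (PySem.Int.floordiv x 3)
    (r.1, r.2.1, r.2.2 + 1)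
  else (decide (x = 1), 0, 0)
termination_by x.natAbs
decreasing_by
  · rw [PySem.Int.floordiv_eq_ediv_of_pos (by omega)]
    rw [PySem.Int.mod_eq_emod_of_pos (by omega)] at h2
    omega
  · rw [PySem.Int.floordiv_eq_ediv_of_pos (by omega)]
    rw [PySem.Int.mod_eq_emod_of_pos (by omega)] at h3
    omega

def is_2a_3b_py_alt (x : Int) : Bool × Int × Int :=
  if x ≤ 0 then (false, 0, 0) else pvGo x

-- ===== PRECONDITION & SPEC =====
def Spec_is_2a_3b_py (x : Int) (out : Bool × Int × Int) : Prop := out = is_2a_3b_py_alt x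
instance (x : Int) (out : Bool × Int × Int) : Decidable (Spec_is_2a_3b_py x out) := by unfold Spec_is_2a_3b_py; infer_instance

-- ===== CLAIM (what is proved, stated in full; the proofs are below) =====
def Claim_equal_is_2a_3b_py : Prop := ∀ (x : Int), Dom_is_2a_3b_py x → Spec_is_2a_3b_py x (is_2a_3b_py x)

-- ===== LEMMAS AND PROOFS =====

theorem pvStrip2_step (x a : Int) (h : 0 < x ∧ PySem.Int.band x 1 = 0) :
    pvStrip2 x a = pvStrip2 (x >>> (1 : Nat)) (a + 1) := by
  conv_lhs => rw [pvStrip2]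
  rw [dif_pos h]

theorem pvStrip2_stop (x a : Int) (h : ¬ (0 < x ∧ PySem.Int.band x 1 = 0)) :
    pvStrip2 x a = (x, a) := by
  conv_lhs => rw [pvStrip2]
  rw [dif_neg h]

theorem pvStrip3_step (x b : Int) (h : 0 < x ∧ PySem.Int.mod x 3 = 0) :
    pvStrip3 x b = pvStrip3 (PySem.Int.floordiv x 3) (b + 1) := by
  conv_lhs => rw [pvStrip3]
  rw [dif_pos h]

theorem pvStrip3_stop (x b : Int) (h : ¬ (0 < x ∧ PySem.Int.mod x 3 = 0)) :
    pvStrip3 x b = (x, b) := by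
  conv_lhs => rw [pvStrip3]
  rw [dif_neg h]

-- band x 1 = 0 ↔ x % 2 = 0 (as Lean emod), for rewriting A's loop guard.
theorem pv_band_guard (x : Int) : (PySem.Int.band x 1 = 0) ↔ x % 2 = 0 := by
  have h1 := PySem.Int.band_one x
  rw [h1, PySem.Int.mod_eq_emod_of_pos (by omega : (0:Int) < 2)]

theorem pv_shift_one (x : Int) : x >>> (1 : Nat) = x / 2 := by
  rw [Int.shiftRight_eq_div_pow]; norm_num

-- the accumulator of pvStrip2 just adds up
theorem pvStrip2_acc (n : Nat) : ∀ (x a : Int), x.natAbs ≤ n →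
    pvStrip2 x a = ((pvStrip2 x 0).1, (pvStrip2 x 0).2 + a) := by
  induction n with
  | zero =>
    intro x a hx
    have hg : ¬ (0 < x ∧ PySem.Int.band x 1 = 0) := by intro ⟨h1, _⟩; omega
    rw [pvStrip2_stop x a hg, pvStrip2_stop x 0 hg]
    simp
  | succ n ih =>
    intro x a hx
    by_cases hg : 0 < x ∧ PySem.Int.band x 1 = 0
    · have hm : x % 2 = 0 := (pv_band_guard x).1 hg.2
      have hlt : (x >>> (1 : Nat)).natAbs ≤ n := by rw [pv_shift_one]; omega
      rw [pvStrip2_step x a hg, pvStrip2_step x 0 hg,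
        ih (x >>> (1 : Nat)) (a + 1) hlt, ih (x >>> (1 : Nat)) (0 + 1) hlt]
      simp only [Prod.mk.injEq]
      exact ⟨trivial, by ring⟩
    · rw [pvStrip2_stop x a hg, pvStrip2_stop x 0 hg]
      simp

theorem pvStrip3_acc (n : Nat) : ∀ (x b : Int), x.natAbs ≤ n →
    pvStrip3 x b = ((pvStrip3 x 0).1, (pvStrip3 x 0).2 + b) := by
  induction n with
  | zero =>
    intro x b hx
    have hg : ¬ (0 < x ∧ PySem.Int.mod x 3 = 0) := by intro ⟨h1, _⟩; omega
    rw [pvStrip3_stop x b hg, pvStrip3_stop x 0 hg]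
    simp
  | succ n ih =>
    intro x b hx
    by_cases hg : 0 < x ∧ PySem.Int.mod x 3 = 0
    · have hm : x % 3 = 0 := by
        have := hg.2; rwa [PySem.Int.mod_eq_emod_of_pos (by omega : (0:Int) < 3)] at this
      have hlt : (PySem.Int.floordiv x 3).natAbs ≤ n := by
        rw [PySem.Int.floordiv_eq_ediv_of_pos (by omega : (0:Int) < 3)]; omega
      rw [pvStrip3_step x b hg, pvStrip3_step x 0 hg,
        ih (PySem.Int.floordiv x 3) (b + 1) hlt, ih (PySem.Int.floordiv x 3) (0 + 1) hlt]
      simp only [Prod.mk.injEq]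
      exact ⟨trivial, by ring⟩
    · rw [pvStrip3_stop x b hg, pvStrip3_stop x 0 hg]
      simp

-- the core of A (after the positivity guard), as one expression
def pvACore (x : Int) : Bool × Int × Int :=
  let p := pvStrip2 x 0
  let q := pvStrip3 p.1 0
  (decide (q.1 = 1), p.2, q.2)

theorem pvGo_eq_core (n : Nat) : ∀ x : Int, x.natAbs ≤ n → 0 < x → pvGo x = pvACore x := by
  induction n with
  | zero => intro x hx h0; omega
  | succ n ih =>
    intro x hx h0
    have h2iff := pv_band_guard x
    by_cases h2 : x % 2 = 0
    · -- even case: both peel a 2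
      have hg2 : 0 < x ∧ PySem.Int.mod x 2 = 0 := by
        refine ⟨h0, ?_⟩; rw [PySem.Int.mod_eq_emod_of_pos (by omega : (0:Int) < 2)]; exact h2
      have hfd : PySem.Int.floordiv x 2 = x / 2 :=
        PySem.Int.floordiv_eq_ediv_of_pos (by omega : (0:Int) < 2)
      have hle : (x / 2).natAbs ≤ n := by omega
      have hpos : 0 < x / 2 := by omega
      have hih := ih (x / 2) hle hpos
      rw [pvGo, dif_pos hg2, hfd]
      have hA : pvStrip2 x 0 = ((pvStrip2 (x / 2) 0).1, (pvStrip2 (x / 2) 0).2 + 1) := by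
        rw [pvStrip2_step x 0 ⟨h0, h2iff.2 h2⟩, pv_shift_one]
        exact pvStrip2_acc (x / 2).natAbs (x / 2) 1 le_rfl
      simp only [pvACore, hA, hih]

    · by_cases h3 : x % 3 = 0
      · -- odd, divisible by 3: both peel a 3
        have hg2 : ¬ (0 < x ∧ PySem.Int.mod x 2 = 0) := by
          intro ⟨_, hm⟩
          rw [PySem.Int.mod_eq_emod_of_pos (by omega : (0:Int) < 2)] at hm; exact h2 hm
        have hg3 : 0 < x ∧ PySem.Int.mod x 3 = 0 := by
          refine ⟨h0, ?_⟩; rw [PySem.Int.mod_eq_emod_of_pos (by omega : (0:Int) < 3)]; exact h3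
        have hfd : PySem.Int.floordiv x 3 = x / 3 :=
          PySem.Int.floordiv_eq_ediv_of_pos (by omega : (0:Int) < 3)
        have hle : (x / 3).natAbs ≤ n := by omega
        have hpos : 0 < x / 3 := by omega
        have hodd3 : ¬ (x / 3) % 2 = 0 := by omega
        have hih := ih (x / 3) hle hpos
        rw [pvGo, dif_neg hg2, dif_pos hg3, hfd]
        -- on the A side the 2-loop does not fire (x and x/3 are odd)
        have hA2 : pvStrip2 x 0 = (x, 0) := by
          refine pvStrip2_stop x 0 ?_
          intro ⟨_, hb⟩; exact h2 ((pv_band_guard x).1 hb)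
        have hA2' : pvStrip2 (x / 3) 0 = (x / 3, 0) := by
          refine pvStrip2_stop (x / 3) 0 ?_
          intro ⟨_, hb⟩; exact hodd3 ((pv_band_guard (x / 3)).1 hb)
        have hA3 : pvStrip3 x 0 = ((pvStrip3 (x / 3) 0).1, (pvStrip3 (x / 3) 0).2 + 1) := by
          rw [pvStrip3_step x 0 hg3, hfd]
          exact pvStrip3_acc (x / 3).natAbs (x / 3) 1 le_rfl
        simp only [pvACore, hA2, hA2', hA3, hih]

      · -- neither 2 nor 3 divides x: all loops/recursions stop
        have hg2 : ¬ (0 < x ∧ PySem.Int.mod x 2 = 0) := by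
          intro ⟨_, hm⟩
          rw [PySem.Int.mod_eq_emod_of_pos (by omega : (0:Int) < 2)] at hm; exact h2 hm
        have hg3 : ¬ (0 < x ∧ PySem.Int.mod x 3 = 0) := by
          intro ⟨_, hm⟩
          rw [PySem.Int.mod_eq_emod_of_pos (by omega : (0:Int) < 3)] at hm; exact h3 hm
        have hA2 : pvStrip2 x 0 = (x, 0) := by
          refine pvStrip2_stop x 0 ?_
          intro ⟨_, hb⟩; exact h2 ((pv_band_guard x).1 hb)
        have hA3 : pvStrip3 x 0 = (x, 0) := pvStrip3_stop x 0 hg3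
        rw [pvGo, dif_neg hg2, dif_neg hg3]
        simp only [pvACore, hA2, hA3]

-- ===== VERDICT (by name: the statement is the Claim_ definition above) =====
theorem is_2a_3b_py_spec : Claim_equal_is_2a_3b_py := by
  intro x _
  unfold Spec_is_2a_3b_py is_2a_3b_py is_2a_3b_py_alt
  by_cases hx : x ≤ 0
  · simp [hx]
  · simp only [hx, if_false]
    exact (pvGo_eq_core x.natAbs x le_rfl (by omega)).symm
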